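-- pv_equiv track=rewrite | github.com/danhuang0909/nt_database | Program/step1_filter_current_junction_and_best40.py | fetch_jun
-- ===== SOURCE A (Python) =====
-- def fetch_jun(st, cigar):
--     """ fetch exon regions defined by cigar. st must be zero based
-- 	return list of tuple of (chrom,st, end)
-- 	"""
--     # match = re.compile(r'(\d+)(\D)')
--     chrome_st = st
--     jun_bound = []
--     jun_read_pos = []
--     read_st = 0
--     chrome_e = chrome_st
--     read_e = read_st
--     for c, s in cigar:  # code and size
--         if c == 0:  # match
--             chrome_e += s
--             read_e += s
--         elif c == 1:  # insertion to ref
--             read_e += s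
--         elif c == 2:  # deletion to ref
--             chrome_e += s
--         elif c == 3:  # gap or intron
--             jun_bound.append([chrome_st, chrome_e])
--             jun_read_pos.append([read_st, read_e])
--             chrome_e += s
--             chrome_st = chrome_e
--             read_st = read_e
--         else:
--             continue
--     jun_bound.append([chrome_st, chrome_e])
--     jun_read_pos.append([read_st, read_e])
--     return [jun_bound, jun_read_pos]
-- ===== SOURCE B (Python) =====
-- def fetch_jun(st, cigar):
--     # Phase 1: split the cigar into intron-separated op-groups,
--     # each paired with the size of the intron that follows it (0 for the last).
--     groups = []
--     cur = []
--     for c, s in cigar: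
--         if c == 3:
--             groups.append((cur, s))
--             cur = []
--         else:
--             cur.append((c, s))
--     groups.append((cur, 0))
--     # Phase 2: emit one segment per group from running start positions.
--     jun_bound = []
--     jun_read_pos = []
--     chrome_st = st
--     read_st = 0
--     for ops, intron in groups:
--         reflen = sum(s for c, s in ops if c == 0 or c == 2)
--         readlen = sum(s for c, s in ops if c == 0 or c == 1)
--         jun_bound.append([chrome_st, chrome_st + reflen])
--         jun_read_pos.append([read_st, read_st + readlen])
--         chrome_st += reflen + intron
--         read_st += readlen
--     return [jun_bound, jun_read_pos]
-- ===== Notes on version B (the rewrite author's own statement) =====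
-- stated objective: alternative
-- what changed: Replaces A's single stateful scan (six mutable variables, segment boundaries updated in-branch) by a two-phase decomposition: first split the cigar into intron-separated op-groups, then emit each segment from per-group ref/read length sums and running start positions.
import Mathlib
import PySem

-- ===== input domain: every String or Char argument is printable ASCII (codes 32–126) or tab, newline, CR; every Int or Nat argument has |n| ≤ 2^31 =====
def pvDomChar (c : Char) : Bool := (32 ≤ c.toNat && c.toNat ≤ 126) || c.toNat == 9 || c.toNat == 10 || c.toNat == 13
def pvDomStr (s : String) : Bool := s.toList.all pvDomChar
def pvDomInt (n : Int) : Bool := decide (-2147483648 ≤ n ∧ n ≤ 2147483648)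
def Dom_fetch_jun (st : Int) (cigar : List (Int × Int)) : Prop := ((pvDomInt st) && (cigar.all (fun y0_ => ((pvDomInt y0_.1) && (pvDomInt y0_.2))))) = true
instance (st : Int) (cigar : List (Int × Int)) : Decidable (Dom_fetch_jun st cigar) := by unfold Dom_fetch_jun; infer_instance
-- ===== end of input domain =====

-- B restructures A's single stateful scan into two phases (split at introns, then emit
-- per-group segments); same values everywhere, objective: alternative decomposition.

-- ===== PORT A =====
-- A's for-loop, step for step: state (chrome_st, chrome_e, read_st, read_e, jun_bound, jun_read_pos)
def fetchJunLoopA (cigar : List (Int × Int)) (chrome_st chrome_e read_st read_e : Int)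
    (jun_bound jun_read_pos : List (List Int)) : List (List (List Int)) :=
  match cigar with
  | [] => [jun_bound ++ [[chrome_st, chrome_e]], jun_read_pos ++ [[read_st, read_e]]]
  | (c, s) :: rest =>
      if c = 0 then fetchJunLoopA rest chrome_st (chrome_e + s) read_st (read_e + s) jun_bound jun_read_pos
      else if c = 1 then fetchJunLoopA rest chrome_st chrome_e read_st (read_e + s) jun_bound jun_read_pos
      else if c = 2 then fetchJunLoopA rest chrome_st (chrome_e + s) read_st read_e jun_bound jun_read_pos
      else if c = 3 then
        fetchJunLoopA rest (chrome_e + s) (chrome_e + s) read_e read_e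
          (jun_bound ++ [[chrome_st, chrome_e]]) (jun_read_pos ++ [[read_st, read_e]])
      else fetchJunLoopA rest chrome_st chrome_e read_st read_e jun_bound jun_read_pos

def fetch_jun (st : Int) (cigar : List (Int × Int)) : List (List (List Int)) :=
  fetchJunLoopA cigar st st 0 0 [] []

-- ===== PORT B =====
-- sum(s for c,s in ops if c == 0 or c == 2)
def pvRefLen (ops : List (Int × Int)) : Int :=
  ops.foldl (fun a p => if p.1 = 0 ∨ p.1 = 2 then a + p.2 else a) 0

-- sum(s for c,s in ops if c == 0 or c == 1)
def pvReadLen (ops : List (Int × Int)) : Int :=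
  ops.foldl (fun a p => if p.1 = 0 ∨ p.1 = 1 then a + p.2 else a) 0

-- Phase 1 of Source B: forward loop with state (groups, cur), then append the last group
def pvGroups (cigar : List (Int × Int)) : List (List (Int × Int) × Int) :=
  let r := cigar.foldl
    (fun (acc : List (List (Int × Int) × Int) × List (Int × Int)) p =>
      if p.1 = 3 then (acc.1 ++ [(acc.2, p.2)], []) else (acc.1, acc.2 ++ [p]))
    ([], [])
  r.1 ++ [(r.2, 0)]

-- Phase 2 of Source B: emit one segment per group from running starts
def fetch_jun_alt (st : Int) (cigar : List (Int × Int)) : List (List (List Int)) :=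
  let fin := (pvGroups cigar).foldl
    (fun (acc : List (List Int) × List (List Int) × Int × Int) gi =>
      let rl := pvRefLen gi.1
      let dl := pvReadLen gi.1
      (acc.1 ++ [[acc.2.2.1, acc.2.2.1 + rl]],
       acc.2.1 ++ [[acc.2.2.2, acc.2.2.2 + dl]],
       acc.2.2.1 + rl + gi.2,
       acc.2.2.2 + dl))
    ([], [], st, 0)
  [fin.1, fin.2.1]

-- ===== PRECONDITION & SPEC =====
def Spec_fetch_jun (st : Int) (cigar : List (Int × Int)) (out : List (List (List Int))) : Prop := out = fetch_jun_alt st cigar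
instance (st : Int) (cigar : List (Int × Int)) (out : List (List (List Int))) : Decidable (Spec_fetch_jun st cigar out) := by unfold Spec_fetch_jun; infer_instance

-- ===== CLAIM (what is proved, stated in full; the proofs are below) =====
def Claim_equal_fetch_jun : Prop := ∀ (st : Int) (cigar : List (Int × Int)), Dom_fetch_jun st cigar → Spec_fetch_jun st cigar (fetch_jun st cigar)

-- ===== LEMMAS AND PROOFS =====

-- recursive version of phase 1: (first group, intron after it) paired with remaining groups
def gRec : List (Int × Int) → (List (Int × Int) × Int) × List (List (Int × Int) × Int)
  | [] => (([], 0), [])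
  | (c, s) :: rest =>
      let r := gRec rest
      if c = 3 then (([], s), r.1 :: r.2) else (((c, s) :: r.1.1, r.1.2), r.2)

-- recursive version of phase 2
def eRec (cst rst : Int) : List (List (Int × Int) × Int) → List (List Int) × List (List Int)
  | [] => ([], [])
  | (g, i) :: gs =>
      let rl := pvRefLen g
      let dl := pvReadLen g
      let p := eRec (cst + rl + i) (rst + dl) gs
      ([cst, cst + rl] :: p.1, [rst, rst + dl] :: p.2)

theorem refLen_shift (g : List (Int × Int)) :
    ∀ a : Int, g.foldl (fun a p => if p.1 = 0 ∨ p.1 = 2 then a + p.2 else a) a = a + pvRefLen g := by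
  induction g with
  | nil => intro a; simp [pvRefLen]
  | cons p rest ih =>
      intro a
      simp only [pvRefLen, List.foldl_cons] at *
      by_cases h : p.1 = 0 ∨ p.1 = 2
      · rw [if_pos h, if_pos h, ih, ih (0 + p.2)]; ring
      · rw [if_neg h, if_neg h, ih]

theorem readLen_shift (g : List (Int × Int)) :
    ∀ a : Int, g.foldl (fun a p => if p.1 = 0 ∨ p.1 = 1 then a + p.2 else a) a = a + pvReadLen g := by
  induction g with
  | nil => intro a; simp [pvReadLen]
  | cons p rest ih =>
      intro a
      simp only [pvReadLen, List.foldl_cons] at *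
      by_cases h : p.1 = 0 ∨ p.1 = 1
      · rw [if_pos h, if_pos h, ih, ih (0 + p.2)]; ring
      · rw [if_neg h, if_neg h, ih]

theorem refLen_cons (p : Int × Int) (g : List (Int × Int)) :
    pvRefLen (p :: g) = (if p.1 = 0 ∨ p.1 = 2 then p.2 else 0) + pvRefLen g := by
  simp only [pvRefLen, List.foldl_cons]
  rw [show (List.foldl (fun a p => if p.1 = 0 ∨ p.1 = 2 then a + p.2 else a)
      (if p.1 = 0 ∨ p.1 = 2 then 0 + p.2 else 0) g) = _ from refLen_shift g _]
  split_ifs <;> simp [pvRefLen]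

theorem readLen_cons (p : Int × Int) (g : List (Int × Int)) :
    pvReadLen (p :: g) = (if p.1 = 0 ∨ p.1 = 1 then p.2 else 0) + pvReadLen g := by
  simp only [pvReadLen, List.foldl_cons]
  rw [show (List.foldl (fun a p => if p.1 = 0 ∨ p.1 = 1 then a + p.2 else a)
      (if p.1 = 0 ∨ p.1 = 1 then 0 + p.2 else 0) g) = _ from readLen_shift g _]
  split_ifs <;> simp [pvReadLen]

theorem refLen_nil : pvRefLen [] = 0 := rfl
theorem readLen_nil : pvReadLen [] = 0 := rfl

theorem eRec_cons (cst rst : Int) (gi : List (Int × Int) × Int) (gs : List (List (Int × Int) × Int)) :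
    eRec cst rst (gi :: gs) =
      ([cst, cst + pvRefLen gi.1] ::
         (eRec (cst + pvRefLen gi.1 + gi.2) (rst + pvReadLen gi.1) gs).1,
       [rst, rst + pvReadLen gi.1] ::
         (eRec (cst + pvRefLen gi.1 + gi.2) (rst + pvReadLen gi.1) gs).2) := by
  obtain ⟨g, i⟩ := gi; rfl

-- the foldl of phase 1 computes gRec
theorem groups_foldl_eq (cigar : List (Int × Int)) :
    ∀ (acc : List (List (Int × Int) × Int)) (cur : List (Int × Int)),
    (let r := cigar.foldl
        (fun (a : List (List (Int × Int) × Int) × List (Int × Int)) p =>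
          if p.1 = 3 then (a.1 ++ [(a.2, p.2)], []) else (a.1, a.2 ++ [p]))
        (acc, cur)
     r.1 ++ [(r.2, 0)]) =
    acc ++ ((cur ++ (gRec cigar).1.1, (gRec cigar).1.2) :: (gRec cigar).2) := by
  induction cigar with
  | nil => intro acc cur; simp [gRec]
  | cons p rest ih =>
      intro acc cur
      simp only [List.foldl_cons, gRec]
      by_cases h : p.1 = 3
      · simp only [h, ih]
        simp
      · simp only [if_neg h, ih]
        simp

theorem pvGroups_eq (cigar : List (Int × Int)) :
    pvGroups cigar = ((gRec cigar).1.1, (gRec cigar).1.2) :: (gRec cigar).2 := by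
  have := groups_foldl_eq cigar [] []
  simpa [pvGroups] using this

-- the foldl of phase 2 computes eRec (in its first two components)
theorem emit_foldl_eq (gs : List (List (Int × Int) × Int)) :
    ∀ (jb jr : List (List Int)) (cst rst : Int),
    ((gs.foldl
        (fun (acc : List (List Int) × List (List Int) × Int × Int) gi =>
          let rl := pvRefLen gi.1
          let dl := pvReadLen gi.1
          (acc.1 ++ [[acc.2.2.1, acc.2.2.1 + rl]],
           acc.2.1 ++ [[acc.2.2.2, acc.2.2.2 + dl]],
           acc.2.2.1 + rl + gi.2,
           acc.2.2.2 + dl))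
        (jb, jr, cst, rst)).1 = jb ++ (eRec cst rst gs).1) ∧
    ((gs.foldl
        (fun (acc : List (List Int) × List (List Int) × Int × Int) gi =>
          let rl := pvRefLen gi.1
          let dl := pvReadLen gi.1
          (acc.1 ++ [[acc.2.2.1, acc.2.2.1 + rl]],
           acc.2.1 ++ [[acc.2.2.2, acc.2.2.2 + dl]],
           acc.2.2.1 + rl + gi.2,
           acc.2.2.2 + dl))
        (jb, jr, cst, rst)).2.1 = jr ++ (eRec cst rst gs).2) := by
  induction gs with
  | nil => intro jb jr cst rst; simp [eRec]
  | cons gi rest ih =>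
      intro jb jr cst rst
      simp only [List.foldl_cons, eRec]
      obtain ⟨h1, h2⟩ := ih (jb ++ [[cst, cst + pvRefLen gi.1]])
        (jr ++ [[rst, rst + pvReadLen gi.1]])
        (cst + pvRefLen gi.1 + gi.2) (rst + pvReadLen gi.1)
      constructor
      · rw [h1]; simp
      · rw [h2]; simp

-- A's loop, related to B's two recursive phases
theorem loopA_eq (cigar : List (Int × Int)) :
    ∀ (cst ce rst re : Int) (jb jr : List (List Int)),
    fetchJunLoopA cigar cst ce rst re jb jr =
      [jb ++ ([cst, ce + pvRefLen (gRec cigar).1.1] ::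
          (eRec (ce + pvRefLen (gRec cigar).1.1 + (gRec cigar).1.2)
                (re + pvReadLen (gRec cigar).1.1) (gRec cigar).2).1),
       jr ++ ([rst, re + pvReadLen (gRec cigar).1.1] ::
          (eRec (ce + pvRefLen (gRec cigar).1.1 + (gRec cigar).1.2)
                (re + pvReadLen (gRec cigar).1.1) (gRec cigar).2).2)] := by
  induction cigar with
  | nil =>
      intro cst ce rst re jb jr
      simp [fetchJunLoopA, gRec, eRec, refLen_nil, readLen_nil]
  | cons p rest ih =>
      intro cst ce rst re jb jr
      obtain ⟨c, s⟩ := p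
      simp only [fetchJunLoopA]
      by_cases h0 : c = 0
      · subst h0
        rw [ih]
        simp only [gRec, show ¬((0:Int) = 3) by norm_num, if_false,
          refLen_cons, readLen_cons]
        norm_num
        ring_nf
        trivial
      · rw [if_neg h0]
        by_cases h1 : c = 1
        · subst h1
          rw [ih]
          simp only [gRec, show ¬((1:Int) = 3) by norm_num, if_false,
            refLen_cons, readLen_cons]
          norm_num
          ring_nf
          trivial
        · rw [if_neg h1]
          by_cases h2 : c = 2
          · subst h2
            rw [ih]
            simp only [gRec, show ¬((2:Int) = 3) by norm_num, if_false,
              refLen_cons, readLen_cons]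
            norm_num
            ring_nf
            trivial
          · rw [if_neg h2]
            by_cases h3 : c = 3
            · subst h3
              rw [ih]
              simp only [gRec, if_true, eRec_cons, refLen_nil, readLen_nil,
                add_zero, List.append_assoc, List.cons_append, List.nil_append]
            · rw [if_neg h3, ih]
              simp only [gRec, if_neg h3, refLen_cons, readLen_cons,
                if_neg (show ¬(c = 0 ∨ c = 2) by tauto),
                if_neg (show ¬(c = 0 ∨ c = 1) by tauto)]
              norm_num

-- ===== VERDICT (by name: the statement is the Claim_ definition above) =====
theorem fetch_jun_spec : Claim_equal_fetch_jun := by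
  intro st cigar _
  unfold Spec_fetch_jun fetch_jun fetch_jun_alt
  rw [pvGroups_eq, loopA_eq]
  obtain ⟨h1, h2⟩ := emit_foldl_eq (((gRec cigar).1.1, (gRec cigar).1.2) :: (gRec cigar).2)
    [] [] st 0
  simp only [eRec, List.nil_append] at h1 h2
  simp only [List.nil_append]
  rw [h1, h2]
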